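-- pv_equiv track=rewrite | github.com/GitDevla/AoC | 2025/day03/run.py | best_joltage
-- ===== SOURCE A (Python) =====
-- def best_joltage(batteries, n=2):
--     best = [0] * n
--     for idx, jolt_str in enumerate(batteries):
--         jolt = int(jolt_str)
--         for i in range(n):
--             if jolt > best[i]:
--                 if idx < len(batteries) - (n - 1 - i):
--                     best = best[:i] + [jolt] + [0] * (n - i - 1)
--                     break
--     return int("".join([str(i) for i in best]))
-- ===== SOURCE B (Python) =====
-- def best_joltage(batteries, n=2):
--     vals = [int(s) for s in batteries]
--     L = len(vals)
--     start = 0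
--     chosen = []
--     for i in range(n):
--         end = L - n + i + 1
--         best = 0
--         bidx = -1
--         for j in range(start, end):
--             if vals[j] > best:
--                 best = vals[j]
--                 bidx = j
--         if bidx >= 0:
--             start = bidx + 1
--         chosen.append(best)
--     return int("".join(str(c) for c in chosen))
-- ===== Notes on version B (the rewrite author's own statement) =====
-- stated objective: alternative
-- what changed: A maintains all n slots online, rescanning and rewriting the slot list for every element; B instead builds the answer slot-by-slot with n independent windowed leftmost-maximum scans over the input, keeping only a running start index.
import Mathlib
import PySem

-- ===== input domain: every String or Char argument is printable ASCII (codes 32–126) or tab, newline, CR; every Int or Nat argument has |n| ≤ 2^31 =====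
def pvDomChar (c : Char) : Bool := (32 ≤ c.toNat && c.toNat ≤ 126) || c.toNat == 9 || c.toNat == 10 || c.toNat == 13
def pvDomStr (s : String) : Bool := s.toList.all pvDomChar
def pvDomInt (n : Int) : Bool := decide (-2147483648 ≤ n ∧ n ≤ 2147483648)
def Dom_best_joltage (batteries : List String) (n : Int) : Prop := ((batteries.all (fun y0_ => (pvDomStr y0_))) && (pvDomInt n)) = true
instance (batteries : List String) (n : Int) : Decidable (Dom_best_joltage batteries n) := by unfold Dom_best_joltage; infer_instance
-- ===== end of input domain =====

-- B replaces A's online pass (which rewrites the whole slot list on each element) by n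
-- independent windowed leftmost-maximum selections; alternative decomposition, same cost class.

-- ===== PORT A =====
-- A's inner 'for i in range(n)' reads best[i] for i = 0..n-1 and len(best) = n always,
-- so the loop is ported as the structural recursion over best carrying the index i;
-- branches in Python's order, break = returning, best[:i] = the rebuilt prefix.
def bjInner (jolt idx L n : Int) : Int → List Int → List Int
  | _, [] => []
  | i, b :: rest =>
    if jolt > b then
      if idx < L - (n - 1 - i) then
        jolt :: List.replicate (n - i - 1).toNat 0
      else b :: bjInner jolt idx L n (i + 1) rest
    else b :: bjInner jolt idx L n (i + 1) rest

def best_joltage (batteries : List String) (n : Int) : Int :=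
  let best := List.replicate n.toNat 0            -- [0] * n
  let best := (PySem.List.enumerate batteries).foldl
    (fun best p =>
      let jolt := (PySem.Int.ofStr? p.2).getD 0    -- int(jolt_str); Pre_ makes it parse
      bjInner jolt p.1 (batteries.length : Int) n 0 best) best
  (PySem.Int.ofStr? (PySem.Str.join "" (best.map PySem.Int.toStr))).getD 0  -- int("".join(...)); Pre_ gives n ≥ 1

-- ===== PORT B =====
-- inner 'for j in range(start, end)' of Source B: running (best, bidx) with bidx = -1 sentinel
def bjWin (vals : List Int) (start e : Int) : Int × Int :=
  (PySem.List.pyRange start e 1).foldl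
    (fun p j => if PySem.List.pyGetD vals j 0 > p.1 then (PySem.List.pyGetD vals j 0, j) else p)
    (0, -1)

-- outer 'for i in range(n)' of Source B: fuel = number of slots still to fill
def bjSlots (vals : List Int) (L n : Int) : Nat → Int → Int → List Int
  | 0, _, _ => []
  | fuel + 1, i, start =>
    let p := bjWin vals start (L - n + i + 1)
    p.1 :: bjSlots vals L n fuel (i + 1) (if p.2 ≥ 0 then p.2 + 1 else start)

def best_joltage_alt (batteries : List String) (n : Int) : Int :=
  let vals := batteries.map (fun s => (PySem.Int.ofStr? s).getD 0)
  let chosen := bjSlots vals (vals.length : Int) n n.toNat 0 0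
  (PySem.Int.ofStr? (PySem.Str.join "" (chosen.map PySem.Int.toStr))).getD 0

-- ===== PRECONDITION & SPEC =====
-- Pre_ excludes exactly where the Python A raises: n ≤ 0 (int("") is a ValueError) and
-- strings int() cannot parse (ValueError).
def Pre_best_joltage (batteries : List String) (n : Int) : Prop :=
  1 ≤ n ∧ ∀ s ∈ batteries, (PySem.Int.ofStr? s).isSome = true
instance (batteries : List String) (n : Int) : Decidable (Pre_best_joltage batteries n) := by
  unfold Pre_best_joltage; infer_instance

def pvWitness_best_joltage : List String × Int := (["3", "-1", "5"], 2)

def Spec_best_joltage (batteries : List String) (n : Int) (out : Int) : Prop := out = best_joltage_alt batteries n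
instance (batteries : List String) (n : Int) (out : Int) : Decidable (Spec_best_joltage batteries n out) := by unfold Spec_best_joltage; infer_instance

-- ===== CLAIM (what is proved, stated in full; the proofs are below) =====
def Claim_equal_best_joltage : Prop := ∀ (batteries : List String) (n : Int), Dom_best_joltage batteries n → Pre_best_joltage batteries n → Spec_best_joltage batteries n (best_joltage batteries n)

-- ===== LEMMAS AND PROOFS =====

-- B's slot recursion, generalized by a cap on every window's right end; cap = k is
-- what A's online pass has built after consuming the first k elements, cap = L is B.
def bjW (vals : List Int) (L n cap : Int) : Nat → Int → Int → List Int
  | 0, _, _ => []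
  | fuel + 1, i, start =>
    let p := bjWin vals start (min cap (L - n + i + 1))
    p.1 :: bjW vals L n cap fuel (i + 1) (if p.2 ≥ 0 then p.2 + 1 else start)

lemma winFold_snd_mem (vals js : List Int) (init : Int × Int) :
    (js.foldl (fun p j => if PySem.List.pyGetD vals j 0 > p.1 then (PySem.List.pyGetD vals j 0, j) else p) init).2 = init.2
    ∨ (js.foldl (fun p j => if PySem.List.pyGetD vals j 0 > p.1 then (PySem.List.pyGetD vals j 0, j) else p) init).2 ∈ js := by
  induction js generalizing init with
  | nil => exact Or.inl rfl
  | cons j js ih =>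
    simp only [List.foldl_cons]
    rcases ih (if PySem.List.pyGetD vals j 0 > init.1 then (PySem.List.pyGetD vals j 0, j) else init) with h | h
    · rw [h]
      split
      · exact Or.inr (List.mem_cons_self)
      · exact Or.inl rfl
    · exact Or.inr (List.mem_cons_of_mem _ h)

lemma bjWin_snd (vals : List Int) (s e : Int) :
    (bjWin vals s e).2 = -1 ∨ (s ≤ (bjWin vals s e).2 ∧ (bjWin vals s e).2 < e) := by
  rcases winFold_snd_mem vals (PySem.List.pyRange s e 1) (0, -1) with h | h
  · exact Or.inl h
  · exact Or.inr (PySem.List.mem_pyRange_one.mp h)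

lemma bjWin_empty (vals : List Int) (s e : Int) (h : e ≤ s) : bjWin vals s e = (0, -1) := by
  simp [bjWin, PySem.List.pyRange_one_eq_nil h]

lemma bjWin_succ (vals : List Int) (s e : Int) (h : s ≤ e) :
    bjWin vals s (e + 1) =
      (if PySem.List.pyGetD vals e 0 > (bjWin vals s e).1
       then (PySem.List.pyGetD vals e 0, e) else bjWin vals s e) := by
  simp [bjWin, PySem.List.pyRange_one_succ_right h, List.foldl_append]

lemma bjW_frozen (vals : List Int) (L n cap : Int) (fuel : Nat) :
    ∀ i start, cap ≤ start → bjW vals L n cap fuel i start = List.replicate fuel 0 := by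
  induction fuel with
  | zero => intro i start _; rfl
  | succ fuel ih =>
    intro i start hcs
    rw [bjW, bjWin_empty vals start _ (le_trans (min_le_left _ _) hcs)]
    simp only [List.replicate_succ]
    exact congrArg _ (by simpa using ih (i + 1) start hcs)

lemma bjW_eq_slots (vals : List Int) (L n : Int) (fuel : Nat) :
    ∀ i start, i + (fuel : Int) = n → bjW vals L n L fuel i start = bjSlots vals L n fuel i start := by
  induction fuel with
  | zero => intro i start _; rfl
  | succ fuel ih =>
    intro i start hif
    rw [bjW, bjSlots, min_eq_right (by push_cast at hif ⊢; omega)]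
    exact congrArg _ (ih (i + 1) _ (by push_cast at hif ⊢; omega))

lemma bjInner_step (vals : List Int) (L n k : Int) (hk0 : 0 ≤ k) (_hkL : k < L) (fuel : Nat) :
    ∀ i start, 0 ≤ start → start ≤ k → i + (fuel : Int) = n →
    bjInner (PySem.List.pyGetD vals k 0) k L n i (bjW vals L n k fuel i start)
      = bjW vals L n (k + 1) fuel i start := by
  induction fuel with
  | zero => intro i start _ _ _; rfl
  | succ fuel ih =>
    intro i start hs0 hsk hif
    by_cases hC : L - n + i + 1 ≤ k
    · -- the window for this slot is closed: same window under both caps, A's idx test fails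
      rw [bjW, bjW, min_eq_right hC, min_eq_right (by omega : L - n + i + 1 ≤ k + 1)]
      simp only [bjInner]
      have hidx : ¬ ((k : Int) < L - (n - 1 - i)) := by omega
      rcases bjWin_snd vals start (L - n + i + 1) with h2 | h2
      · rw [h2, if_neg (by omega : ¬ ((-1 : Int) ≥ 0))]
        have hr := ih (i + 1) start hs0 hsk (by push_cast at hif ⊢; omega)
        split <;> exact congrArg _ hr
      · rw [if_pos (by omega : (bjWin vals start (L - n + i + 1)).2 ≥ 0)]
        have hr := ih (i + 1) ((bjWin vals start (L - n + i + 1)).2 + 1) (by omega) (by omega)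
          (by push_cast at hif ⊢; omega)
        split <;> exact congrArg _ hr
    · -- the window gains exactly the new index k
      rw [bjW, bjW, min_eq_left (by omega : (k : Int) ≤ L - n + i + 1),
        min_eq_left (by omega : (k : Int) + 1 ≤ L - n + i + 1), bjWin_succ vals start k hsk]
      by_cases hv : PySem.List.pyGetD vals k 0 > (bjWin vals start k).1
      · simp only [if_pos hv, bjInner]
        rw [if_pos (by omega : (k : Int) < L - (n - 1 - i)),
          if_pos (by omega : (k : Int) ≥ 0),
          bjW_frozen vals L n (k + 1) fuel (i + 1) (k + 1) le_rfl,
          show (n - i - 1).toNat = fuel by push_cast at hif; omega]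
      · simp only [if_neg hv, bjInner]
        rcases bjWin_snd vals start k with h2 | h2
        · rw [h2, if_neg (by omega : ¬ ((-1 : Int) ≥ 0))]
          exact congrArg _ (ih (i + 1) start hs0 hsk (by push_cast at hif ⊢; omega))
        · rw [if_pos (by omega : (bjWin vals start k).2 ≥ 0)]
          exact congrArg _ (ih (i + 1) ((bjWin vals start k).2 + 1) (by omega) (by omega)
            (by push_cast at hif ⊢; omega))

lemma foldA_eq (bs : List String) (n : Int) (hn : 0 ≤ n) (k : Nat) (hk : k ≤ bs.length) :
    (PySem.List.enumerate (bs.take k)).foldl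
      (fun best p => bjInner ((PySem.Int.ofStr? p.2).getD 0) p.1 (bs.length : Int) n 0 best)
      (List.replicate n.toNat 0)
    = bjW (bs.map fun s => (PySem.Int.ofStr? s).getD 0) (bs.length : Int) n (k : Int) n.toNat 0 0 := by
  induction k with
  | zero =>
    rw [List.take_zero]
    simp only [Nat.cast_zero]
    rw [bjW_frozen _ _ _ _ _ 0 0 le_rfl]
    rfl
  | succ k ih =>
    have hlt : k < bs.length := by omega
    rw [List.take_add_one, List.getElem?_eq_getElem hlt]
    simp only [Option.toList_some]
    rw [PySem.List.enumerate_append, List.foldl_append, ih (by omega)]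
    simp only [PySem.List.enumerate_cons, PySem.List.enumerate_nil, List.foldl_cons,
      List.foldl_nil, List.length_take, min_eq_left (le_of_lt hlt)]
    have hv : (PySem.Int.ofStr? bs[k]).getD 0
        = PySem.List.pyGetD (bs.map fun s => (PySem.Int.ofStr? s).getD 0) (k : Int) 0 := by
      rw [PySem.List.pyGetD_natCast]
      rw [List.getD_eq_getElem?_getD, List.getElem?_map, List.getElem?_eq_getElem hlt]
      rfl
    rw [show ((0 : Int) + (k : Nat)) = (k : Int) by omega, hv]
    rw [bjInner_step _ _ _ _ (by omega) (by exact_mod_cast hlt) _ 0 0 le_rfl (by omega)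
      (by omega)]
    norm_num

-- ===== VERDICT (by name: the statement is the Claim_ definition above) =====
theorem best_joltage_spec : Claim_equal_best_joltage := by
  intro bs n _hDom hPre
  obtain ⟨hn, -⟩ := hPre
  unfold Spec_best_joltage
  have h := foldA_eq bs n (by omega) bs.length le_rfl
  rw [List.take_length] at h
  simp only [best_joltage, best_joltage_alt, List.length_map]
  rw [h, bjW_eq_slots _ _ _ _ 0 0 (by omega)]
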